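-- pv_equiv track=rewrite | github.com/kdm0927/codingtest | LeeTaeJeong/week5/조이스틱.py | solution
-- ===== SOURCE A (Python) =====
-- def solution(name):
--     # 1. 상하 이동 횟수 계산 (알파벳 변경 비용)
--     # 각 문자에 대해 위로 조작하는 것과 아래로 조작하는 것 중 작은 값을 더함
--     spell_move = 0
--     for char in name:
--         spell_move += min(ord(char) - ord('A'), 26 - (ord(char) - ord('A')))
--
--     # 2. 좌우 이동 횟수 계산 (커서 이동 비용)
--     n = len(name)
--     min_move = n - 1  # 기본값: 오른쪽으로만 쭉 가는 경우
--
--     for i in range(n):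
--         # 현재 위치 i에서 다음 'A'가 아닌 문자의 위치(next_i)를 찾음
--         next_i = i + 1
--         while next_i < n and name[next_i] == 'A':
--             next_i += 1
--
--
--         # 방식 1: 0 -> i -> 0 -> next_i
--         distance_r_l = i * 2 + (n - next_i)
--         # 방식 2: 0 -> next_i -> 0 -> i
--         distance_l_r = (n - next_i) * 2 + i
--
--         min_move = min(min_move, distance_r_l, distance_l_r)
--
--     return spell_move + min_move
-- ===== SOURCE B (Python) =====
-- def solution(name):
--     # Alternative structure: one backward pass precomputes, for each i, the next index > i holding a
--     # non-'A' character; then a single loop over the cursor strategies reads it off.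
--     n = len(name)
--     spell_move = sum(min(ord(c) - 65, 26 - (ord(c) - 65)) for c in name)
--     nxt = [n] * n
--     nn = n
--     for i in range(n - 1, -1, -1):
--         nxt[i] = nn
--         if name[i] != 'A':
--             nn = i
--     min_move = n - 1
--     for i, j in enumerate(nxt):
--         min_move = min(min_move, 2 * i + (n - j), 2 * (n - j) + i)
--     return spell_move + min_move
-- ===== Notes on version B (the rewrite author's own statement) =====
-- stated objective: alternative
-- what changed: Replaced A's per-position inner while-scan for the next non-'A' character with a single backward precomputation pass building a nxt array, then one enumerate loop over it.
import Mathlib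
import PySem

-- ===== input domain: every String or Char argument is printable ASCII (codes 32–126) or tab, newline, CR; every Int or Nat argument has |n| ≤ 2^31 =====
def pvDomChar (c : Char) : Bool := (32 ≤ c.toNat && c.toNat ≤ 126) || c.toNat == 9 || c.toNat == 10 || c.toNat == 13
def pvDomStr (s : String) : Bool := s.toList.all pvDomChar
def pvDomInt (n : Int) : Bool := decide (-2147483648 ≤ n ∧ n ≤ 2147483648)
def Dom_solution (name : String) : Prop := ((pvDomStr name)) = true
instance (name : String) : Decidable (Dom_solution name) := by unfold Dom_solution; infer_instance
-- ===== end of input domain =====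

-- B replaces A's per-position inner while-scan for the next non-'A' character by one
-- backward precomputation pass building a nxt array (an alternative single-pass structure).

-- ===== PORT A =====
-- A's inner while loop: next_i = i+1; while next_i < n and name[next_i] == 'A': next_i += 1
def aNext (cs : List Char) (j : Nat) : Nat :=
  if h : j < cs.length then
    if cs[j] = 'A' then aNext cs (j + 1) else j
  else j
termination_by cs.length - j

def solution (name : String) : Int :=
  let cs := name.toList
  let spell := cs.foldl
    (fun acc c => acc + min ((c.toNat : Int) - 65) (26 - ((c.toNat : Int) - 65))) 0
  let n := cs.length
  let minMove := (List.range n).foldl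
    (fun m i =>
      let nexti := aNext cs (i + 1)
      let dRL := (i : Int) * 2 + ((n : Int) - (nexti : Int))
      let dLR := ((n : Int) - (nexti : Int)) * 2 + (i : Int)
      min (min m dRL) dLR)
    ((n : Int) - 1)
  spell + minMove

-- ===== PORT B =====
-- B's backward pass (Python's `for i in range(n-1, -1, -1)` building nxt), written as
-- structural recursion on the suffix starting at absolute index i0; returns
-- (nn for index i0-1, the nxt entries for indices ≥ i0).
def bPass : List Char → Nat → Nat × List Nat
  | [], i0 => (i0, [])
  | c :: rest, i0 =>
    let (nn, tail) := bPass rest (i0 + 1)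
    (if c ≠ 'A' then i0 else nn, nn :: tail)

def solution_alt (name : String) : Int :=
  let cs := name.toList
  let n := cs.length
  let spell := (cs.map (fun c => min ((c.toNat : Int) - 65) (26 - ((c.toNat : Int) - 65)))).sum
  let nxt := (bPass cs 0).2
  let minMove := (PySem.List.enumerate nxt).foldl
    (fun m p => min (min m (2 * p.1 + ((n : Int) - (p.2 : Int)))) (2 * ((n : Int) - (p.2 : Int)) + p.1))
    ((n : Int) - 1)
  spell + minMove

-- ===== PRECONDITION & SPEC =====
def Spec_solution (name : String) (out : Int) : Prop := out = solution_alt name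
instance (name : String) (out : Int) : Decidable (Spec_solution name out) := by unfold Spec_solution; infer_instance

-- ===== CLAIM (what is proved, stated in full; the proofs are below) =====
def Claim_equal_solution : Prop := ∀ (name : String), Dom_solution name → Spec_solution name (solution name)

-- ===== LEMMAS AND PROOFS =====

theorem bPass_snd_length (cs : List Char) (i0 : Nat) : ((bPass cs i0).2).length = cs.length := by
  induction cs generalizing i0 with
  | nil => simp [bPass]
  | cons c rest ih => simp [bPass, ih]

theorem bPass_fst_eq_aNext (cs : List Char) (i0 : Nat) (full : List Char)
    (h : full.drop i0 = cs) (hlen : i0 ≤ full.length) :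
    (bPass cs i0).1 = aNext full i0 := by
  induction cs generalizing i0 with
  | nil =>
    have : full.length ≤ i0 := by
      by_contra hlt
      push Not at hlt
      have := List.length_drop (l := full) (i := i0)
      rw [h] at this; simp at this; omega
    rw [aNext]; simp [bPass, Nat.not_lt.mpr this]
  | cons c rest ih =>
    have hlt : i0 < full.length := by
      by_contra hge
      push Not at hge
      rw [List.drop_eq_nil_of_le hge] at h; simp at h
    have hget : full[i0] = c := by
      have h0 : (full.drop i0)[0]'(by simp [h]) = c := by simp [h]
      rw [List.getElem_drop] at h0
      simpa using h0
    have hdrop : full.drop (i0 + 1) = rest := by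
      have : (full.drop i0).drop 1 = rest := by rw [h]; simp
      simpa [List.drop_drop, Nat.add_comm] using this
    rw [aNext]
    simp only [bPass, hlt, dif_pos, hget]
    by_cases hc : c = 'A'
    · simp [hc, ih (i0 + 1) hdrop (by omega)]
    · simp [hc]

theorem bPass_snd_get (cs : List Char) (i0 k : Nat) (hk : k < cs.length) :
    ((bPass cs i0).2)[k]'(by rw [bPass_snd_length]; exact hk) =
      (bPass (cs.drop (k + 1)) (i0 + k + 1)).1 := by
  induction cs generalizing i0 k with
  | nil => simp at hk
  | cons c rest ih =>
    cases k with
    | zero => simp [bPass]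
    | succ k' =>
      have hk' : k' < rest.length := by simpa using hk
      have := ih (i0 + 1) k' hk'
      simp only [bPass]
      simpa [Nat.add_assoc, Nat.add_comm, Nat.add_left_comm] using this

theorem nxt_eq_map (cs : List Char) :
    (bPass cs 0).2 = (List.range cs.length).map (fun i => aNext cs (i + 1)) := by
  apply List.ext_getElem
  · simp [bPass_snd_length]
  · intro k h1 h2
    have hk : k < cs.length := by simpa [bPass_snd_length] using h1
    rw [bPass_snd_get cs 0 k hk]
    have := bPass_fst_eq_aNext (cs.drop (k + 1)) (k + 1) cs rfl (by omega)
    simp only [Nat.zero_add] at this ⊢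
    simp [this]

theorem enum_map_range (n : Nat) (f : Nat → Nat) :
    PySem.List.enumerate ((List.range n).map f) 0 = (List.range n).map (fun i : Nat => ((i : Int), f i)) := by
  apply List.ext_getElem
  · simp [PySem.List.length_enumerate]
  · intro k h1 h2
    have hk : k < n := by simpa [PySem.List.length_enumerate] using h1
    rw [PySem.List.getElem_enumerate]
    simp

theorem solution_eq (name : String) : solution name = solution_alt name := by
  unfold solution solution_alt
  simp only []
  congr 1
  -- spell parts
  · rw [PySem.List.foldl_add]
    simp
  -- cursor-move parts
  · rw [nxt_eq_map, enum_map_range]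
    rw [List.foldl_map]
    congr 1
    funext m i
    simp only []
    ring_nf

-- ===== VERDICT (by name: the statement is the Claim_ definition above) =====
theorem solution_spec : Claim_equal_solution := by
  intro name _
  unfold Spec_solution
  exact solution_eq name
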